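-- pv_equiv track=rewrite | github.com/yniknafs/taco | taco/lib/path_graph.py | _constrain_k
-- ===== SOURCE A (Python) =====
-- def _constrain_k(node_lengths, frag_length, kmin):
--     path_length = 0
--     path_k = 0
--     i = 0
--     j = 0
--     while i < len(node_lengths):
--         while j < len(node_lengths):
--             if (path_length >= frag_length) and ((j - i) >= kmin):
--                 break
--             path_length += node_lengths[j]
--             j += 1
--         path_k = max(path_k, (j - i))
--         if j == len(node_lengths):
--             break
--         path_length -= node_lengths[i]
--         i += 1
--     return path_k
-- ===== SOURCE B (Python) =====
-- def _constrain_k(node_lengths, frag_length, kmin):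
--     n = len(node_lengths)
--     best = 0
--     for i in range(n):
--         running = 0
--         j = i
--         while j < n and not (running >= frag_length and (j - i) >= kmin):
--             running += node_lengths[j]
--             j += 1
--         best = max(best, j - i)
--     return best
-- ===== Notes on version B (the rewrite author's own statement) =====
-- stated objective: simpler
-- what changed: Replaces the two-pointer loop that threads path_length and the j pointer across start indices with an independent per-start rescan that recomputes each window sum from zero.
import Mathlib
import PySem

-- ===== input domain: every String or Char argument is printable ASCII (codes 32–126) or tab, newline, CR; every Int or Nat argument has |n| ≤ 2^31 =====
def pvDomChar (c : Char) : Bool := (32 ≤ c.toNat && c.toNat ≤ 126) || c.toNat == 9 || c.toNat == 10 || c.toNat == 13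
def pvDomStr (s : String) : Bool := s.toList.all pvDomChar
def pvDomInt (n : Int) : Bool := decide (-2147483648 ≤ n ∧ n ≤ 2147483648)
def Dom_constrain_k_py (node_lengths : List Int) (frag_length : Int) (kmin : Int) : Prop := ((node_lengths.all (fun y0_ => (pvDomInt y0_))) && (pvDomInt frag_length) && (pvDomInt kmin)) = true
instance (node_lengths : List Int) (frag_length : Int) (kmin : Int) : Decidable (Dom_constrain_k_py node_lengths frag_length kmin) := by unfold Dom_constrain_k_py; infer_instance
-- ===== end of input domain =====

-- B replaces A's incremental two-pointer (path_length and j threaded across start indices)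
-- with an independent per-start rescan that recomputes each window sum from zero.

-- ===== PORT A =====
-- A's inner loop: 'while j < len: if path_length >= frag_length and (j-i) >= kmin: break;
--                  path_length += node_lengths[j]; j += 1'
def constrainKInnerA (l : List Int) (f k : Int) (i j : Nat) (pl : Int) : Nat × Int :=
  if h : j < l.length then
    if pl ≥ f ∧ (j : Int) - (i : Int) ≥ k then (j, pl)
    else constrainKInnerA l f k i (j + 1) (pl + l[j])
  else (j, pl)
termination_by l.length - j
decreasing_by omega

-- A's outer loop: 'while i < len: <inner>; path_k = max(path_k, j-i);
--                  if j == len: break; path_length -= node_lengths[i]; i += 1'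
def constrainKOuterA (l : List Int) (f k : Int) (i j : Nat) (pl pk : Int) : Int :=
  if h : i < l.length then
    if (constrainKInnerA l f k i j pl).1 = l.length then
      max pk (((constrainKInnerA l f k i j pl).1 : Int) - (i : Int))
    else
      constrainKOuterA l f k (i + 1) (constrainKInnerA l f k i j pl).1
        ((constrainKInnerA l f k i j pl).2 - l[i])
        (max pk (((constrainKInnerA l f k i j pl).1 : Int) - (i : Int)))
  else pk
termination_by l.length - i
decreasing_by omega

def constrain_k_py (node_lengths : List Int) (frag_length : Int) (kmin : Int) : Int :=
  constrainKOuterA node_lengths frag_length kmin 0 0 0 0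

-- ===== PORT B =====
-- B's scan: 'while j < n and not (running >= frag_length and (j-i) >= kmin):
--            running += node_lengths[j]; j += 1'
def constrainKScan (l : List Int) (f k : Int) (i j : Nat) (s : Int) : Nat :=
  if h : j < l.length ∧ ¬(s ≥ f ∧ (j : Int) - (i : Int) ≥ k) then
    constrainKScan l f k i (j + 1) (s + l[j]'h.1)
  else j
termination_by l.length - j
decreasing_by omega

-- B's 'for i in range(n): … best = max(best, j - i)'
def constrain_k_py_alt (node_lengths : List Int) (frag_length : Int) (kmin : Int) : Int :=
  (List.range node_lengths.length).foldl
    (fun best i => max best ((constrainKScan node_lengths frag_length kmin i i 0 : Int) - (i : Int))) 0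

-- ===== PRECONDITION & SPEC =====
def Spec_constrain_k_py (node_lengths : List Int) (frag_length : Int) (kmin : Int) (out : Int) : Prop := out = constrain_k_py_alt node_lengths frag_length kmin
instance (node_lengths : List Int) (frag_length : Int) (kmin : Int) (out : Int) : Decidable (Spec_constrain_k_py node_lengths frag_length kmin out) := by unfold Spec_constrain_k_py; infer_instance

-- ===== CLAIM (what is proved, stated in full; the proofs are below) =====
def Claim_equal_constrain_k_py : Prop := ∀ (node_lengths : List Int) (frag_length : Int) (kmin : Int), Dom_constrain_k_py node_lengths frag_length kmin → Spec_constrain_k_py node_lengths frag_length kmin (constrain_k_py node_lengths frag_length kmin)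

-- ===== LEMMAS AND PROOFS =====

-- prefix sum of the first m node lengths
def pvT (l : List Int) (m : Nat) : Int := (l.take m).sum

-- the break condition of both loops, on abstract indices
def pvCond (l : List Int) (f k : Int) (i j : Nat) : Prop :=
  pvT l j - pvT l i ≥ f ∧ (j : Int) - (i : Int) ≥ k

lemma pvT_succ (l : List Int) (m : Nat) (h : m < l.length) :
    pvT l (m + 1) = pvT l m + l[m] :=
  List.sum_take_succ l m h

-- spec of A's inner loop: it stops at the first index ≥ j satisfying the break condition
lemma innerA_spec (l : List Int) (f k : Int) (i : Nat) :
    ∀ j pl, pl = pvT l j - pvT l i → j ≤ l.length →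
      j ≤ (constrainKInnerA l f k i j pl).1 ∧
      (constrainKInnerA l f k i j pl).1 ≤ l.length ∧
      (constrainKInnerA l f k i j pl).2 = pvT l (constrainKInnerA l f k i j pl).1 - pvT l i ∧
      (∀ m, j ≤ m → m < (constrainKInnerA l f k i j pl).1 → ¬ pvCond l f k i m) ∧
      ((constrainKInnerA l f k i j pl).1 = l.length ∨ pvCond l f k i (constrainKInnerA l f k i j pl).1) := by
  suffices H : ∀ d j pl, l.length - j ≤ d → pl = pvT l j - pvT l i → j ≤ l.length →
      j ≤ (constrainKInnerA l f k i j pl).1 ∧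
      (constrainKInnerA l f k i j pl).1 ≤ l.length ∧
      (constrainKInnerA l f k i j pl).2 = pvT l (constrainKInnerA l f k i j pl).1 - pvT l i ∧
      (∀ m, j ≤ m → m < (constrainKInnerA l f k i j pl).1 → ¬ pvCond l f k i m) ∧
      ((constrainKInnerA l f k i j pl).1 = l.length ∨ pvCond l f k i (constrainKInnerA l f k i j pl).1) by
    intro j pl h1 h2; exact H (l.length - j) j pl le_rfl h1 h2
  intro d
  induction d with
  | zero =>
    intro j pl hd hpl hj
    have hnlt : ¬ j < l.length := by omega
    rw [constrainKInnerA, dif_neg hnlt]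
    exact ⟨le_rfl, hj, hpl, fun m h1 h2 => absurd (lt_of_le_of_lt h1 h2) (lt_irrefl _), Or.inl (by omega)⟩
  | succ d ih =>
    intro j pl hd hpl hj
    by_cases hlt : j < l.length
    · rw [constrainKInnerA, dif_pos hlt]
      by_cases hc : pl ≥ f ∧ (j : Int) - (i : Int) ≥ k
      · rw [if_pos hc]
        exact ⟨le_rfl, hj, hpl, fun m h1 h2 => absurd (lt_of_le_of_lt h1 h2) (lt_irrefl _),
          Or.inr ⟨by rw [← hpl]; exact hc.1, hc.2⟩⟩
      · rw [if_neg hc]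
        have hpl' : pl + l[j] = pvT l (j + 1) - pvT l i := by
          rw [pvT_succ l j hlt]; omega
        obtain ⟨h1, h2, h3, h4, h5⟩ := ih (j + 1) (pl + l[j]) (by omega) hpl' (by omega)
        refine ⟨by omega, h2, h3, ?_, h5⟩
        intro m hm1 hm2
        rcases Nat.eq_or_lt_of_le hm1 with rfl | hm
        · intro hcm; exact hc ⟨by rw [hpl]; exact hcm.1, hcm.2⟩
        · exact h4 m hm hm2
    · rw [constrainKInnerA, dif_neg hlt]
      exact ⟨le_rfl, hj, hpl, fun m h1 h2 => absurd (lt_of_le_of_lt h1 h2) (lt_irrefl _), Or.inl (by omega)⟩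

-- spec of B's scan: same first-match characterisation
lemma scan_spec (l : List Int) (f k : Int) (i : Nat) :
    ∀ j s, s = pvT l j - pvT l i → j ≤ l.length →
      j ≤ constrainKScan l f k i j s ∧
      constrainKScan l f k i j s ≤ l.length ∧
      (∀ m, j ≤ m → m < constrainKScan l f k i j s → ¬ pvCond l f k i m) ∧
      (constrainKScan l f k i j s = l.length ∨ pvCond l f k i (constrainKScan l f k i j s)) := by
  suffices H : ∀ d j s, l.length - j ≤ d → s = pvT l j - pvT l i → j ≤ l.length →
      j ≤ constrainKScan l f k i j s ∧
      constrainKScan l f k i j s ≤ l.length ∧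
      (∀ m, j ≤ m → m < constrainKScan l f k i j s → ¬ pvCond l f k i m) ∧
      (constrainKScan l f k i j s = l.length ∨ pvCond l f k i (constrainKScan l f k i j s)) by
    intro j s h1 h2; exact H (l.length - j) j s le_rfl h1 h2
  intro d
  induction d with
  | zero =>
    intro j s hd hs hj
    have hng : ¬ (j < l.length ∧ ¬(s ≥ f ∧ (j : Int) - (i : Int) ≥ k)) := fun hg => by omega
    rw [constrainKScan, dif_neg hng]
    exact ⟨le_rfl, hj, fun m h1 h2 => absurd (lt_of_le_of_lt h1 h2) (lt_irrefl _), Or.inl (by omega)⟩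
  | succ d ih =>
    intro j s hd hs hj
    by_cases hg : j < l.length ∧ ¬(s ≥ f ∧ (j : Int) - (i : Int) ≥ k)
    · rw [constrainKScan, dif_pos hg]
      have hs' : s + l[j]'hg.1 = pvT l (j + 1) - pvT l i := by
        rw [pvT_succ l j hg.1]; omega
      obtain ⟨h1, h2, h3, h4⟩ := ih (j + 1) (s + l[j]'hg.1) (by omega) hs' (by omega)
      refine ⟨by omega, h2, ?_, h4⟩
      intro m hm1 hm2
      rcases Nat.eq_or_lt_of_le hm1 with rfl | hm
      · intro hcm; exact hg.2 ⟨by rw [hs]; exact hcm.1, hcm.2⟩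
      · exact h3 m hm hm2
    · rw [constrainKScan, dif_neg hg]
      refine ⟨le_rfl, hj, fun m h1 h2 => absurd (lt_of_le_of_lt h1 h2) (lt_irrefl _), ?_⟩
      by_cases hjl : j < l.length
      · right
        have hcb : s ≥ f ∧ (j : Int) - (i : Int) ≥ k := by
          by_contra hnc; exact hg ⟨hjl, hnc⟩
        exact ⟨by rw [← hs]; exact hcb.1, hcb.2⟩
      · exact Or.inl (by omega)

-- first-match points are unique
lemma first_match_unique (n : Nat) (c : Nat → Prop) (j a b : Nat)
    (ha1 : j ≤ a) (ha2 : a ≤ n) (ha3 : ∀ m, j ≤ m → m < a → ¬ c m) (ha4 : a = n ∨ c a)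
    (hb1 : j ≤ b) (hb2 : b ≤ n) (hb3 : ∀ m, j ≤ m → m < b → ¬ c m) (hb4 : b = n ∨ c b) :
    a = b := by
  rcases Nat.lt_trichotomy a b with h | h | h
  · rcases ha4 with rfl | hc
    · omega
    · exact absurd hc (hb3 a ha1 h)
  · exact h
  · rcases hb4 with rfl | hc
    · omega
    · exact absurd hc (ha3 b hb1 h)

-- B's running best after the first m starts
def pvPartialB (l : List Int) (f k : Int) (m : Nat) : Int :=
  (List.range m).foldl
    (fun best i => max best ((constrainKScan l f k i i 0 : Int) - (i : Int))) 0

lemma partialB_succ (l : List Int) (f k : Int) (m : Nat) :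
    pvPartialB l f k (m + 1) =
      max (pvPartialB l f k m) ((constrainKScan l f k m m 0 : Int) - (m : Int)) := by
  simp [pvPartialB, List.range_succ]

lemma partialB_nonneg (l : List Int) (f k : Int) (m : Nat) : 0 ≤ pvPartialB l f k m := by
  induction m with
  | zero => simp [pvPartialB]
  | succ m ih => rw [partialB_succ]; exact le_trans ih (le_max_left _ _)

lemma partialB_stable (l : List Int) (f k : Int) (m : Nat) :
    ∀ m', m ≤ m' →
    (∀ i, m ≤ i → i < m' → ((constrainKScan l f k i i 0 : Int) - (i : Int)) ≤ pvPartialB l f k m) →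
    pvPartialB l f k m' = pvPartialB l f k m := by
  intro m'
  induction m' with
  | zero =>
    intro h _
    have hm : m = 0 := by omega
    subst hm
    rfl
  | succ m'' ih =>
    intro h hb
    rcases Nat.eq_or_lt_of_le h with rfl | h'
    · rfl
    · have hm'' : m ≤ m'' := by omega
      rw [partialB_succ, ih hm'' (fun i h1 h2 => hb i h1 (by omega)), max_eq_left]
      exact hb m'' hm'' (by omega)

-- the main outer-loop invariant: A's remaining run returns B's overall best
lemma outerA_invariant (l : List Int) (f k : Int) :
    ∀ i j pl pk,
      i ≤ l.length → j ≤ l.length →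
      pl = pvT l j - pvT l i →
      (∀ i' j', i ≤ i' → i' ≤ j' → j' < j → pvCond l f k i' j' → pvCond l f k i' j) →
      pk = pvPartialB l f k i →
      ((i = 0 ∧ j = 0) ∨ (0 < i ∧ (j : Int) - (i : Int) + 1 ≤ pk)) →
      (j < i → f ≤ 0 ∧ k ≤ 0) →
      constrainKOuterA l f k i j pl pk = pvPartialB l f k l.length := by
  suffices H : ∀ d i j pl pk, l.length - i ≤ d →
      i ≤ l.length → j ≤ l.length →
      pl = pvT l j - pvT l i →
      (∀ i' j', i ≤ i' → i' ≤ j' → j' < j → pvCond l f k i' j' → pvCond l f k i' j) →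
      pk = pvPartialB l f k i →
      ((i = 0 ∧ j = 0) ∨ (0 < i ∧ (j : Int) - (i : Int) + 1 ≤ pk)) →
      (j < i → f ≤ 0 ∧ k ≤ 0) →
      constrainKOuterA l f k i j pl pk = pvPartialB l f k l.length by
    intro i j pl pk h1 h2 h3 h4 h5 h6 h7
    exact H (l.length - i) i j pl pk le_rfl h1 h2 h3 h4 h5 h6 h7
  intro d
  induction d with
  | zero =>
    intro i j pl pk hd hi hj hpl hW hpk h5 h6
    have hnlt : ¬ i < l.length := by omega
    rw [constrainKOuterA, dif_neg hnlt]
    have : i = l.length := by omega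
    rw [hpk, this]
  | succ d ih =>
    intro i j pl pk hd hi hj hpl hW hpk h5 h6
    by_cases hlt : i < l.length
    · rw [constrainKOuterA, dif_pos hlt]
      obtain ⟨hjr, hrn, hr2, hscan, hbrk⟩ := innerA_spec l f k i j pl hpl hj
      obtain ⟨hib, hbn, hbscan, hbbrk⟩ := scan_spec l f k i i 0 (by simp) (le_of_lt hlt)
      have hcondii_of : (f ≤ 0 ∧ k ≤ 0) → pvCond l f k i i := fun hfk =>
        ⟨by rw [sub_self]; exact hfk.1, by omega⟩
      -- S1: A's recorded window update equals B's window update at start i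
      have hS1 : max pk (((constrainKInnerA l f k i j pl).1 : Int) - (i : Int)) =
          max pk ((constrainKScan l f k i i 0 : Int) - (i : Int)) := by
        by_cases hji : j ≤ i
        · by_cases hiJ : i ≤ (constrainKInnerA l f k i j pl).1
          · have heq : (constrainKInnerA l f k i j pl).1 = constrainKScan l f k i i 0 :=
              first_match_unique l.length (pvCond l f k i) i _ _ hiJ hrn
                (fun m hm1 hm2 => hscan m (le_trans hji hm1) hm2) hbrk hib hbn hbscan hbbrk
            rw [heq]
          · have hfk : f ≤ 0 ∧ k ≤ 0 := h6 (by omega)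
            have hbi : i = constrainKScan l f k i i 0 :=
              first_match_unique l.length (pvCond l f k i) i i _ le_rfl (le_of_lt hlt)
                (fun m hm1 hm2 => absurd (lt_of_le_of_lt hm1 hm2) (lt_irrefl _))
                (Or.inr (hcondii_of hfk)) hib hbn hbscan hbbrk
            have hpk0 : 0 ≤ pk := hpk ▸ partialB_nonneg l f k i
            rw [← hbi, max_eq_left (by omega), max_eq_left (by omega)]
        · have h5' : (j : Int) - (i : Int) + 1 ≤ pk := by
            rcases h5 with ⟨hi0, hj0⟩ | ⟨_, hle⟩
            · omega
            · exact hle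
          by_cases hjn : j = l.length
          · have hJeq : (constrainKInnerA l f k i j pl).1 = l.length := by omega
            rw [max_eq_left (by omega), max_eq_left (by omega)]
          · by_cases hcj : pvCond l f k i j
            · have hJj : (constrainKInnerA l f k i j pl).1 = j := by
                by_contra hne
                exact hscan j le_rfl (by omega) hcj
              have hbj : constrainKScan l f k i i 0 ≤ j := by
                by_contra hbgt
                exact hbscan j (by omega) (by omega) hcj
              rw [max_eq_left (by omega), max_eq_left (by omega)]
            · have heq : (constrainKInnerA l f k i j pl).1 = constrainKScan l f k i i 0 := by
                refine first_match_unique l.length (pvCond l f k i) i _ _ (by omega) hrn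
                  ?_ hbrk hib hbn hbscan hbbrk
                intro m hm1 hm2
                by_cases hmj : j ≤ m
                · exact hscan m hmj hm2
                · intro hcm
                  exact hcj (hW i m le_rfl hm1 (by omega) hcm)
              rw [heq]
      have hpk' : max pk (((constrainKInnerA l f k i j pl).1 : Int) - (i : Int)) =
          pvPartialB l f k (i + 1) := by
        rw [hS1, partialB_succ, hpk]
      by_cases hJn : (constrainKInnerA l f k i j pl).1 = l.length
      · rw [if_pos hJn, hpk']
        refine (partialB_stable l f k (i + 1) l.length (by omega) ?_).symm
        intro i' h1 h2
        obtain ⟨_, hi'2, _, _⟩ := scan_spec l f k i' i' 0 (by simp) (by omega)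
        have hle : ((constrainKScan l f k i' i' 0 : Int) - (i' : Int)) ≤
            (((constrainKInnerA l f k i j pl).1 : Int) - (i : Int)) := by omega
        rw [← hpk']
        exact le_trans hle (le_max_right _ _)
      · rw [if_neg hJn]
        have hcJ : pvCond l f k i (constrainKInnerA l f k i j pl).1 := hbrk.resolve_left hJn
        apply ih
        · omega
        · omega
        · exact hrn
        · rw [hr2, pvT_succ l i hlt]; ring
        · -- the forward-closure invariant at (i+1, J)
          intro i' j' hi' hij' hj'J hc
          refine ⟨?_, by have := hc.2; omega⟩
          by_cases hcase : j ≤ j'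
          · have hnc : ¬ pvCond l f k i j' := hscan j' hcase hj'J
            have hsum : pvT l j' - pvT l i < f := by
              by_contra hge
              push Not at hge
              exact hnc ⟨hge, by have := hc.2; omega⟩
            have h1 := hc.1
            have h2 := hcJ.1
            linarith
          · have hcj'j : pvCond l f k i' j := hW i' j' (by omega) hij' (by omega) hc
            by_cases hJj : (constrainKInnerA l f k i j pl).1 = j
            · rw [hJj]; exact hcj'j.1
            · have hncj : ¬ pvCond l f k i j := hscan j le_rfl (by omega)
              have hsum : pvT l j - pvT l i < f := by
                by_contra hge
                push Not at hge
                exact hncj ⟨hge, by have := hcj'j.2; omega⟩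
              have h1 := hcj'j.1
              have h2 := hcJ.1
              linarith
        · exact hpk'
        · refine Or.inr ⟨by omega, ?_⟩
          have := le_max_right pk (((constrainKInnerA l f k i j pl).1 : Int) - (i : Int))
          omega
        · intro hJi1
          by_cases hji2 : j < i
          · exact h6 hji2
          · have hJi : (constrainKInnerA l f k i j pl).1 = i := by omega
            rw [hJi] at hcJ
            obtain ⟨h1, h2⟩ := hcJ
            rw [sub_self] at h1
            exact ⟨h1, by omega⟩
    · rw [constrainKOuterA, dif_neg hlt]
      have : i = l.length := by omega
      rw [hpk, this]

-- ===== VERDICT (by name: the statement is the Claim_ definition above) =====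
theorem constrain_k_py_spec : Claim_equal_constrain_k_py := by
  intro l f k _
  show constrain_k_py l f k = constrain_k_py_alt l f k
  exact outerA_invariant l f k 0 0 0 0 (Nat.zero_le _) (Nat.zero_le _)
    (by simp [pvT])
    (by intro i' j' _ _ h _; exact absurd h (Nat.not_lt_zero _))
    rfl (Or.inl ⟨rfl, rfl⟩)
    (by intro h; exact absurd h (lt_irrefl 0))
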